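-- pv_equiv track=rewrite | github.com/cascandaliato/Advent-of-Code | pyutils/__init__.py | split_by_empty_line
-- ===== SOURCE A (Python) =====
-- def split_by_empty_line(lines):
--     ans = [[]]
--     for line in lines:
--         if line:
--             ans[-1].append(line)
--         else:
--             ans.append([])
--     return ans
-- ===== SOURCE B (Python) =====
-- def split_by_empty_line(lines):
--     xs = list(lines)
--     group = []
--     i = 0
--     while i < len(xs) and xs[i]:
--         group.append(xs[i])
--         i += 1
--     if i == len(xs):
--         return [group]
--     return [group] + split_by_empty_line(xs[i + 1:])
-- ===== Notes on version B (the rewrite author's own statement) =====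
-- stated objective: alternative
-- what changed: Replaces A's single-pass loop that mutates the last group of an accumulator with a recursive span decomposition: take the leading run of non-empty lines as one group, then recurse on the remainder past the separator.
import Mathlib
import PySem

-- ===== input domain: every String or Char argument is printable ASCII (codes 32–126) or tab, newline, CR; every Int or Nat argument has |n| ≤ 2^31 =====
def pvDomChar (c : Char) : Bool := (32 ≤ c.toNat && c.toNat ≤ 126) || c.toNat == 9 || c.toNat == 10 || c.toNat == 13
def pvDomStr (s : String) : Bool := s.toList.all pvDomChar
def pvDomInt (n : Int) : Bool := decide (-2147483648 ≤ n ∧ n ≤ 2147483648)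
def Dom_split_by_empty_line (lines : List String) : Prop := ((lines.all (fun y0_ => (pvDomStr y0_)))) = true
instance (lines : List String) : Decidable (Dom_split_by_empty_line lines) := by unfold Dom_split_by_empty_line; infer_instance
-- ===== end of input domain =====

-- B replaces A's single-pass accumulator (mutating the last group) by a recursive
-- span decomposition (leading non-empty run, recurse past the separator); same value, same cost.


-- ===== PORT A =====
-- A's loop: ans starts as [[]]; a truthy line is appended to the last group, a falsy
-- line starts a new empty group.
def splitGoA (ans : List (List String)) (lines : List String) : List (List String) :=
  match lines with
  | [] => ans
  | l :: ls =>
      if l ≠ "" then splitGoA (ans.dropLast ++ [ans.getLastD [] ++ [l]]) ls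
      else splitGoA (ans ++ [[]]) ls

def split_by_empty_line (lines : List String) : List (List String) :=
  splitGoA [[]] lines

-- ===== PORT B =====
-- B: the leading run of truthy (non-empty) lines is one group; if nothing remains that
-- is the whole answer, otherwise drop the separator and recurse on the remainder.
def split_by_empty_line_alt (lines : List String) : List (List String) :=
  if hr : lines.dropWhile (fun l => l ≠ "") = [] then
    [lines.takeWhile (fun l => l ≠ "")]
  else
    lines.takeWhile (fun l => l ≠ "") ::
      split_by_empty_line_alt (lines.dropWhile (fun l => l ≠ "")).tail
termination_by lines.length
decreasing_by
  have hle := List.length_dropWhile_le (fun l : String => decide (l ≠ "")) lines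
  cases hc : lines.dropWhile (fun l => l ≠ "") with
  | nil => exact absurd hc hr
  | cons a t => rw [hc] at hle; simp at hle ⊢; omega

-- ===== PRECONDITION & SPEC =====
def Spec_split_by_empty_line (lines : List String) (out : List (List String)) : Prop := out = split_by_empty_line_alt lines
instance (lines : List String) (out : List (List String)) : Decidable (Spec_split_by_empty_line lines out) := by unfold Spec_split_by_empty_line; infer_instance

-- ===== CLAIM (what is proved, stated in full; the proofs are below) =====
def Claim_equal_split_by_empty_line : Prop := ∀ (lines : List String), Dom_split_by_empty_line lines → Spec_split_by_empty_line lines (split_by_empty_line lines)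

-- ===== LEMMAS AND PROOFS =====

-- Clean recursive description of the grouping: splitGrp g ls finishes the open group g.
def splitGrp (g : List String) (lines : List String) : List (List String) :=
  match lines with
  | [] => [g]
  | l :: ls => if l ≠ "" then splitGrp (g ++ [l]) ls else g :: splitGrp [] ls

theorem splitGoA_eq_grp (ls : List String) :
    ∀ (pre : List (List String)) (g : List String),
      splitGoA (pre ++ [g]) ls = pre ++ splitGrp g ls := by
  induction ls with
  | nil => intro pre g; simp [splitGoA, splitGrp]
  | cons l ls ih =>
      intro pre g
      by_cases hl : l = ""
      · have h1 : splitGoA (pre ++ [g]) (l :: ls) = splitGoA ((pre ++ [g]) ++ [[]]) ls := by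
          simp [splitGoA, hl]
        rw [h1, ih (pre ++ [g]) []]
        simp [splitGrp, hl]
      · have h1 : splitGoA (pre ++ [g]) (l :: ls) = splitGoA (pre ++ [g ++ [l]]) ls := by
          simp [splitGoA, hl]
        rw [h1, ih]
        simp [splitGrp, hl]

theorem splitGrp_modifyHead (ls : List String) :
    ∀ g : List String, splitGrp g ls = (splitGrp [] ls).modifyHead (g ++ ·) := by
  induction ls with
  | nil => intro g; simp [splitGrp]
  | cons l ls ih =>
      intro g
      by_cases hl : l = ""
      · simp [splitGrp, hl]
      · simp only [splitGrp, hl, ne_eq, not_false_iff, if_true, List.nil_append]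
        rw [ih (g ++ [l]), ih [l]]
        cases splitGrp [] ls with
        | nil => simp
        | cons h t => simp

theorem alt_eq (lines : List String) :
    split_by_empty_line_alt lines =
      if lines.dropWhile (fun l => l ≠ "") = [] then
        [lines.takeWhile (fun l => l ≠ "")]
      else
        lines.takeWhile (fun l => l ≠ "") ::
          split_by_empty_line_alt (lines.dropWhile (fun l => l ≠ "")).tail := by
  rw [split_by_empty_line_alt]
  by_cases h : lines.dropWhile (fun l => l ≠ "") = []
  · rw [dif_pos h, if_pos h]
  · rw [dif_neg h, if_neg h]

theorem tw_cons_ne (l : String) (ls : List String) (hl : l ≠ "") :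
    (l :: ls).takeWhile (fun l => l ≠ "") = l :: ls.takeWhile (fun l => l ≠ "") := by
  simp [List.takeWhile_cons, hl]

theorem dw_cons_ne (l : String) (ls : List String) (hl : l ≠ "") :
    (l :: ls).dropWhile (fun l => l ≠ "") = ls.dropWhile (fun l => l ≠ "") := by
  simp [List.dropWhile_cons, hl]

theorem alt_cons_ne (l : String) (ls : List String) (hl : l ≠ "") :
    split_by_empty_line_alt (l :: ls) =
      (split_by_empty_line_alt ls).modifyHead (l :: ·) := by
  rw [alt_eq (l :: ls), alt_eq ls, tw_cons_ne l ls hl, dw_cons_ne l ls hl]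
  by_cases h : ls.dropWhile (fun l => l ≠ "") = []
  · rw [if_pos h, if_pos h]; rfl
  · rw [if_neg h, if_neg h]; rfl

theorem alt_cons_empty (ls : List String) :
    split_by_empty_line_alt ("" :: ls) = [] :: split_by_empty_line_alt ls := by
  rw [alt_eq ("" :: ls)]
  have hdw : ("" :: ls).dropWhile (fun l => l ≠ "") = "" :: ls := by
    simp [List.dropWhile_cons]
  have htw : ("" :: ls).takeWhile (fun l => l ≠ "") = [] := by
    simp [List.takeWhile_cons]
  rw [hdw, htw, if_neg (by simp : ¬("" :: ls = []))]
  rfl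

theorem grp_eq_alt (ls : List String) : splitGrp [] ls = split_by_empty_line_alt ls := by
  induction ls with
  | nil => rw [alt_eq]; simp [splitGrp]
  | cons l ls ih =>
      by_cases hl : l = ""
      · subst hl
        rw [alt_cons_empty, splitGrp]
        simp only [ne_eq, not_true, reduceIte]
        rw [ih]
      · rw [alt_cons_ne l ls hl, ← ih, splitGrp]
        simp only [hl, ne_eq, not_false_iff, if_true, List.nil_append]
        rw [splitGrp_modifyHead ls [l]]
        cases splitGrp [] ls with
        | nil => simp
        | cons a t => simp

-- ===== VERDICT (by name: the statement is the Claim_ definition above) =====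
theorem split_by_empty_line_spec : Claim_equal_split_by_empty_line := by
  intro lines _
  unfold Spec_split_by_empty_line split_by_empty_line
  have h := splitGoA_eq_grp lines ([] : List (List String)) []
  simpa [grp_eq_alt] using h
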